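-- pv_equiv track=rewrite | github.com/axr2718/nlp-code | A1/main.py | bpe_encode_word
-- ===== SOURCE A (Python) =====
-- from typing import Dict, List, Tuple
--
-- def _word_to_symbols(word: str) -> Tuple[str, ...]:
--     return tuple(list(word) + ['</w>'])
--
-- def _merge_pair_in_word(symbols: Tuple[str, ...], pair: Tuple[str, str]) -> Tuple[str, ...]:
--     merged: List[str] = []
--     i = 0
--     while i < len(symbols):
--         if i < len(symbols) - 1 and (symbols[i], symbols[i + 1]) == pair:
--             merged.append(symbols[i] + symbols[i + 1])
--             i += 2
--         else:
--             merged.append(symbols[i])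
--             i += 1
--     return tuple(merged)
--
-- def bpe_encode_word(word: str, merges_rank: Dict[Tuple[str, str], int]) -> List[str]:
--     if not word:
--         return []
--     symbols = _word_to_symbols(word)
--     if len(symbols) == 1:
--         return [word]
--
--     def get_pairs(seq: Tuple[str, ...]) -> List[Tuple[str, str]]:
--         return [(seq[i], seq[i + 1]) for i in range(len(seq) - 1)]
--
--     pairs = get_pairs(symbols)
--     while True:
--         candidate_pairs = {p: merges_rank[p] for p in pairs if p in merges_rank}
--         if not candidate_pairs:
--             break
--         best_pair = min(candidate_pairs.items(), key=lambda kv: kv[1])[0]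
--         symbols = _merge_pair_in_word(symbols, best_pair)
--         if len(symbols) == 1:
--             break
--         pairs = get_pairs(symbols)
--
--     tokens = [s.replace('</w>', '') for s in symbols]
--     # Remove empties if any appeared after stripping marker
--     return [t for t in tokens if t]
-- ===== SOURCE B (Python) =====
-- def _merge_best_pass(symbols, a, b):
--     out = []
--     pend = None
--     for s in symbols:
--         if pend is None:
--             pend = s
--         elif pend == a and s == b:
--             out.append(a + b)
--             pend = None
--         else:
--             out.append(pend)
--             pend = s
--     if pend is not None:
--         out.append(pend)
--     return out
--
--
-- def bpe_encode_word(word, merges_rank):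
--     symbols = list(word) + ['</w>']
--     while len(symbols) > 1:
--         # index the first position of every adjacent pair in one pass
--         first = {}
--         for i, p in enumerate(zip(symbols, symbols[1:])):
--             first.setdefault(p, i)
--         # rule-driven round: lexicographic (rank, position) minimum over the rule table
--         best = None  # (rank, pos, pair)
--         for (a, b), r in merges_rank.items():
--             pos = first.get((a, b))
--             if pos is not None and (best is None or (r, pos) < (best[0], best[1])):
--                 best = (r, pos, (a, b))
--         if best is None:
--             break
--         symbols = _merge_best_pass(symbols, best[2][0], best[2][1])
--     return [t for t in (s.replace('</w>', '') for s in symbols) if t]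
-- ===== Notes on version B (the rewrite author's own statement) =====
-- stated objective: alternative
-- what changed: Each round, A scans the word's adjacent pairs, builds a candidate dict of ranks and calls min() over its items; B inverts the traversal: it indexes the first position of every adjacent pair in one pass, then iterates over the merge-rule table keeping the lexicographic (rank, position) minimum, and merges with a single pending-symbol pass instead of A's index while-loop.
import Mathlib
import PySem

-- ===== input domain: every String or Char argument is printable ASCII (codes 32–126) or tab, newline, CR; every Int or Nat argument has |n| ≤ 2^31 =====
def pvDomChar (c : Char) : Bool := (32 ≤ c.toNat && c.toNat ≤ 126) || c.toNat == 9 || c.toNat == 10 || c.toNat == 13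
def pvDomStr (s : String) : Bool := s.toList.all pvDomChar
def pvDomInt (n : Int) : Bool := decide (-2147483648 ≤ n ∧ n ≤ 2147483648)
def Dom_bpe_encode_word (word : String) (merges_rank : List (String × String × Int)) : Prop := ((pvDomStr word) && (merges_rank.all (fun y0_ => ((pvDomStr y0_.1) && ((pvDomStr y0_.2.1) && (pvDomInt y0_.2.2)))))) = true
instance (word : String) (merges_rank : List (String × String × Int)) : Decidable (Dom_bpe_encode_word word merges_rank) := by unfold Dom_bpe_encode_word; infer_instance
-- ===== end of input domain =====

-- B drives each round by the merge-rule table (first adjacent occurrence per rule, lexicographic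
-- (rank, position) minimum) instead of A's scan of word pairs with dict lookups + min(); same result.

-- first-match lookup in the merges_rank association list (the Python dict argument)
def rankOf (merges : List (String × String × Int)) (p : String × String) : Option Int :=
  match merges with
  | [] => none
  | (a, b, r) :: rest => if (a, b) = p then some r else rankOf rest p

-- list(word) + ['</w>']  (shared: both Pythons build symbols this way)
def wordToSymbols (word : String) : List String :=
  word.toList.map (fun c => String.ofList [c]) ++ ["</w>"]

-- ===== PORT A =====

-- {p: merges_rank[p] for p in pairs if p in merges_rank}
def aCand (merges : List (String × String × Int)) (pairs : List (String × String)) :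
    PySem.Dict (String × String) Int :=
  pairs.foldl
    (fun d p => match rankOf merges p with
      | some v => d.insert p v
      | none => d) PySem.Dict.empty

-- _merge_pair_in_word: the index-while loop, transliterated structurally
def aMergePair (pair : String × String) : List String → List String
  | [] => []
  | [x] => [x]
  | x :: y :: rest =>
    if (x, y) = pair then (x ++ y) :: aMergePair pair rest
    else x :: aMergePair pair (y :: rest)

-- one iteration of A's while True; fuel = initial number of symbols is a totality guard only
-- (each iteration that continues shortens the symbol list, so the fuel is never exhausted).
-- `get_pairs` is the adjacent-pairs comprehension = zip; the `if not candidate_pairs: break`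
-- check and Python's min() are together `min? = none / some` (min? is none exactly on the empty dict).
def aLoop (merges : List (String × String × Int)) : Nat → List String → List String
  | 0, symbols => symbols
  | fuel + 1, symbols =>
    let pairs := symbols.zip symbols.tail
    let cand := aCand merges pairs
    match PySem.List.min? cand.items (fun kv => kv.2) with
    | none => symbols
    | some best =>
      let s2 := aMergePair best.1 symbols
      if s2.length = 1 then s2 else aLoop merges fuel s2

def bpe_encode_word (word : String) (merges_rank : List (String × String × Int)) : List String :=
  if word.toList = [] then []
  else
    let symbols := wordToSymbols word
    if symbols.length = 1 then [word]
    else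
      let res := aLoop merges_rank symbols.length symbols
      (res.map (fun s => PySem.Str.replace s "</w>" "")).filter (fun t => t != "")

-- ===== PORT B =====

-- the first-position index of Source B: for i, p in enumerate(zip(symbols, symbols[1:])): first.setdefault(p, i)
def buildFirst : List (String × String) → Nat → PySem.Dict (String × String) Nat →
    PySem.Dict (String × String) Nat
  | [], _, d => d
  | p :: t, k, d => buildFirst t (k + 1) (d.setdefault p k)

-- Python tuple comparison (r, pos) < (r', pos')
def klt (x y : Int × Nat) : Bool := x.1 < y.1 || (x.1 == y.1 && x.2 < y.2)

-- running strict lexicographic minimum, first candidate wins ties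
def lmin (acc : Option (Int × Nat × (String × String))) (x : Int × Nat × (String × String)) :
    Option (Int × Nat × (String × String)) :=
  match acc with
  | none => some x
  | some m => if klt (x.1, x.2.1) (m.1, m.2.1) then some x else some m

-- the rule-driven selection loop of Source B: for every merge rule, look up its first
-- adjacent occurrence in the index and keep the (rank, position)-lexicographic minimum
def bScan (merges : List (String × String × Int)) (symbols : List String) :
    Option (Int × Nat × (String × String)) :=
  let first := buildFirst (symbols.zip symbols.tail) 0 PySem.Dict.empty
  merges.foldl
    (fun acc e =>
      match first.get? (e.1, e.2.1) with
      | none => acc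
      | some i => lmin acc (e.2.2, i, (e.1, e.2.1)))
    none

def bMergeStep (a b : String) (acc : List String × Option String) (s : String) :
    List String × Option String :=
  match acc.2 with
  | none => (acc.1, some s)
  | some pend =>
    if pend = a ∧ s = b then (acc.1 ++ [a ++ b], none)
    else (acc.1 ++ [pend], some s)

def bMergeFin (st : List String × Option String) : List String :=
  match st.2 with
  | none => st.1
  | some pend => st.1 ++ [pend]

-- _merge_best_pass: one left-to-right pass with a pending symbol
def bMerge (a b : String) (symbols : List String) : List String :=
  bMergeFin (symbols.foldl (bMergeStep a b) ([], none))

-- while len(symbols) > 1 of Source B; fuel = initial number of symbols is a totality guard only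
def bLoop (merges : List (String × String × Int)) : Nat → List String → List String
  | 0, symbols => symbols
  | fuel + 1, symbols =>
    if symbols.length ≤ 1 then symbols
    else
      match bScan merges symbols with
      | none => symbols
      | some best => bLoop merges fuel (bMerge best.2.2.1 best.2.2.2 symbols)

def bpe_encode_word_alt (word : String) (merges_rank : List (String × String × Int)) : List String :=
  let symbols := wordToSymbols word
  let res := bLoop merges_rank symbols.length symbols
  (res.map (fun s => PySem.Str.replace s "</w>" "")).filter (fun t => t != "")

-- ===== PRECONDITION & SPEC =====
-- Pre_ excludes merges lists with a repeated pair key: such a list does not encode a Python dict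
-- (A's argument is a dict, whose keys are unique), so its first-match/last-match reading is accidental.
def Pre_bpe_encode_word (word : String) (merges_rank : List (String × String × Int)) : Prop :=
  (merges_rank.map (fun e => (e.1, e.2.1))).Nodup
instance (word : String) (merges_rank : List (String × String × Int)) : Decidable (Pre_bpe_encode_word word merges_rank) := by unfold Pre_bpe_encode_word; infer_instance
def pvWitness_bpe_encode_word : String × (List (String × String × Int)) := ("ab", [("a", "b", 0)])

def Spec_bpe_encode_word (word : String) (merges_rank : List (String × String × Int)) (out : List String) : Prop := out = bpe_encode_word_alt word merges_rank
instance (word : String) (merges_rank : List (String × String × Int)) (out : List String) : Decidable (Spec_bpe_encode_word word merges_rank out) := by unfold Spec_bpe_encode_word; infer_instance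

-- ===== CLAIM (what is proved, stated in full; the proofs are below) =====
def Claim_equal_bpe_encode_word : Prop := ∀ (word : String) (merges_rank : List (String × String × Int)), Dom_bpe_encode_word word merges_rank → Pre_bpe_encode_word word merges_rank → Spec_bpe_encode_word word merges_rank (bpe_encode_word word merges_rank)

-- ===== LEMMAS AND PROOFS =====

-- ---- A-side: Python min() over the candidate dict as a running minimum over the pairs list ----

def pvG (b : Option ((String × String) × Int)) (x : (String × String) × Int) :
    Option ((String × String) × Int) :=
  match b with
  | none => some x
  | some m => if x.2 < m.2 then some x else some m

def pvScanStep (merges : List (String × String × Int))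
    (b : Option ((String × String) × Int)) (p : String × String) :
    Option ((String × String) × Int) :=
  match rankOf merges p with
  | none => b
  | some r => pvG b (p, r)

lemma min?_eq_pvG (l : List ((String × String) × Int)) :
    PySem.List.min? l (fun kv => kv.2) = l.foldl pvG none := by
  unfold PySem.List.min?
  apply PySem.List.foldl_congr_mem
  intro acc x _
  cases acc <;> rfl

lemma pvG_acc_le (l : List ((String × String) × Int)) (b : (String × String) × Int) :
    ∃ m, l.foldl pvG (some b) = some m ∧ m.2 ≤ b.2 := by
  induction l generalizing b with
  | nil => exact ⟨b, rfl, le_refl _⟩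
  | cons x t ih =>
    simp only [List.foldl_cons, pvG]
    split
    · obtain ⟨m, hm, hle⟩ := ih x
      exact ⟨m, hm, le_trans hle (le_of_lt (by assumption))⟩
    · exact ih b

lemma pvG_mem_le (l : List ((String × String) × Int)) (b : Option ((String × String) × Int))
    (x : (String × String) × Int) (hx : x ∈ l) :
    ∃ m, l.foldl pvG b = some m ∧ m.2 ≤ x.2 := by
  induction l generalizing b with
  | nil => cases hx
  | cons y t ih =>
    rcases List.mem_cons.mp hx with rfl | hx'
    · have hacc : ∃ c : (String × String) × Int, pvG b x = some c ∧ c.2 ≤ x.2 := by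
        cases b with
        | none => exact ⟨x, rfl, le_refl _⟩
        | some m =>
          by_cases h : x.2 < m.2
          · exact ⟨x, by simp [pvG, h], le_refl _⟩
          · exact ⟨m, by simp [pvG, h], le_of_not_gt h⟩
      obtain ⟨c, hc, hcle⟩ := hacc
      obtain ⟨m, hm, hmle⟩ := pvG_acc_le t c
      exact ⟨m, by simpa [List.foldl_cons, hc] using hm, le_trans hmle hcle⟩
    · simpa [List.foldl_cons] using ih (pvG b y) hx'

lemma pvG_absorb (l : List ((String × String) × Int)) (x : (String × String) × Int)
    (hx : x ∈ l) : pvG (l.foldl pvG none) x = l.foldl pvG none := by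
  obtain ⟨m, hm, hle⟩ := pvG_mem_le l none x hx
  rw [hm]
  simp [pvG, not_lt_of_ge, hle]

lemma pvA1 (merges : List (String × String × Int)) (P : List (String × String))
    (d : PySem.Dict (String × String) Int)
    (hinv : ∀ kv ∈ d.items, rankOf merges kv.1 = some kv.2) (hnd : d.keys.Nodup) :
    (P.foldl (fun d p => match rankOf merges p with
        | some v => d.insert p v
        | none => d) d).items.foldl pvG none
      = P.foldl (pvScanStep merges) (d.items.foldl pvG none) := by
  induction P generalizing d with
  | nil => rfl
  | cons p P ih =>
    cases hf : rankOf merges p with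
    | none =>
      simp only [List.foldl_cons, pvScanStep, hf]
      exact ih d hinv hnd
    | some r =>
      simp only [List.foldl_cons, pvScanStep, hf]
      have hstep : (d.insert p r).items.foldl pvG none = pvG (d.items.foldl pvG none) (p, r) := by
        by_cases hc : d.contains p = true
        · have hitems : (d.insert p r).items = d.items := by
            rw [PySem.Dict.items_insert_of_contains _ _ hc]
            conv_rhs => rw [← List.map_id d.items]
            apply List.map_congr_left
            intro q hq
            by_cases hqp : (q.1 == p) = true
            · have h1 : q.1 = p := eq_of_beq hqp
              have h2 : rankOf merges q.1 = some q.2 := hinv q hq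
              rw [h1, hf] at h2
              have h3 : r = q.2 := Option.some.inj h2
              cases q
              simp_all
            · simp [hqp]
          rw [hitems]
          have hmem : (p, r) ∈ d.items := by
            have hk : p ∈ d.keys := (PySem.Dict.contains_iff_mem_keys _ _).mp hc
            simp only [PySem.Dict.keys] at hk
            obtain ⟨kv, hkv, hkv1⟩ := List.mem_map.mp hk
            have h2 : rankOf merges kv.1 = some kv.2 := hinv kv hkv
            rw [hkv1, hf] at h2
            have : kv = (p, r) := by
              cases kv
              have := Option.some.inj h2
              simp_all
            exact this ▸ hkv
          exact (pvG_absorb d.items (p, r) hmem).symm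
        · rw [PySem.Dict.items_insert_of_not_contains _ _ (by simpa using hc),
              List.foldl_append]
          rfl
      rw [← hstep]
      apply ih
      · intro kv hkv
        rcases (PySem.Dict.mem_items_insert _ _ _ _).mp hkv with rfl | ⟨h1, _⟩
        · exact hf
        · exact hinv kv h1
      · exact PySem.Dict.nodup_keys_insert _ _ _ hnd

-- ---- key order on (rank, position) ----

def kOf (x : Int × Nat × (String × String)) : Int × Nat := (x.1, x.2.1)

def kle (x y : Int × Nat) : Prop := x.1 < y.1 ∨ (x.1 = y.1 ∧ x.2 ≤ y.2)

lemma klt_iff (x y : Int × Nat) : klt x y = true ↔ x.1 < y.1 ∨ (x.1 = y.1 ∧ x.2 < y.2) := by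
  obtain ⟨a, b⟩ := x; obtain ⟨c, d⟩ := y
  simp only [klt, Bool.or_eq_true, Bool.and_eq_true, decide_eq_true_eq, beq_iff_eq]

lemma kle_refl (x : Int × Nat) : kle x x := by
  obtain ⟨a, b⟩ := x; simp [kle]

lemma kle_trans {x y z : Int × Nat} (h1 : kle x y) (h2 : kle y z) : kle x z := by
  obtain ⟨a, b⟩ := x; obtain ⟨c, d⟩ := y; obtain ⟨e, f⟩ := z
  simp only [kle] at *
  omega

lemma kle_antisymm {x y : Int × Nat} (h1 : kle x y) (h2 : kle y x) : x = y := by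
  obtain ⟨a, b⟩ := x; obtain ⟨c, d⟩ := y
  simp only [kle, Prod.mk.injEq] at *
  omega

lemma klt_kle {x y : Int × Nat} (h : klt x y = true) : kle x y := by
  obtain ⟨a, b⟩ := x; obtain ⟨c, d⟩ := y
  rw [klt_iff] at h
  simp only [kle] at *
  omega

lemma not_klt_kle {x y : Int × Nat} (h : ¬ klt x y = true) : kle y x := by
  obtain ⟨a, b⟩ := x; obtain ⟨c, d⟩ := y
  rw [klt_iff] at h
  simp only [kle] at *
  omega

-- ---- the running lexicographic minimum is the minimum ----

lemma foldl_lmin_some (l : List (Int × Nat × (String × String))) (m0 : Int × Nat × (String × String)) :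
    ∃ m, l.foldl lmin (some m0) = some m ∧ (m = m0 ∨ m ∈ l) ∧ kle (kOf m) (kOf m0) ∧
      ∀ x ∈ l, kle (kOf m) (kOf x) := by
  induction l generalizing m0 with
  | nil => exact ⟨m0, rfl, Or.inl rfl, kle_refl _, by simp⟩
  | cons x t ih =>
    by_cases h : klt (x.1, x.2.1) (m0.1, m0.2.1) = true
    · obtain ⟨m, hm, hmem, hle, hall⟩ := ih x
      refine ⟨m, by simpa [List.foldl_cons, lmin, h] using hm, ?_, ?_, ?_⟩
      · rcases hmem with rfl | h' <;> simp_all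
      · exact kle_trans hle (klt_kle h)
      · intro y hy
        rcases List.mem_cons.mp hy with rfl | hy'
        · exact hle
        · exact hall y hy'
    · obtain ⟨m, hm, hmem, hle, hall⟩ := ih m0
      refine ⟨m, by simpa [List.foldl_cons, lmin, h] using hm, ?_, hle, ?_⟩
      · rcases hmem with rfl | h' <;> simp_all
      · intro y hy
        rcases List.mem_cons.mp hy with rfl | hy'
        · exact kle_trans hle (not_klt_kle h)
        · exact hall y hy'

lemma foldl_lmin_none_spec (l : List (Int × Nat × (String × String)))
    (m : Int × Nat × (String × String)) (h : l.foldl lmin none = some m) :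
    m ∈ l ∧ ∀ x ∈ l, kle (kOf m) (kOf x) := by
  cases l with
  | nil => cases h
  | cons x t =>
    obtain ⟨m', hm', hmem, hle, hall⟩ := foldl_lmin_some t x
    have hx : (x :: t).foldl lmin none = some m' := by simpa [List.foldl_cons, lmin] using hm'
    rw [h] at hx
    obtain rfl := Option.some.inj hx
    constructor
    · rcases hmem with rfl | h' <;> simp_all
    · intro y hy
      rcases List.mem_cons.mp hy with rfl | hy'
      · exact hle
      · exact hall y hy'

lemma foldl_lmin_none_none (l : List (Int × Nat × (String × String)))
    (h : l.foldl lmin none = none) : l = [] := by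
  cases l with
  | nil => rfl
  | cons x t =>
    obtain ⟨m', hm', _, _, _⟩ := foldl_lmin_some t x
    have hx : (x :: t).foldl lmin none = some m' := by simpa [List.foldl_cons, lmin] using hm'
    rw [h] at hx
    cases hx

-- ---- candidate lists ----

def candsA (merges : List (String × String × Int)) :
    List (String × String) → Nat → List (Int × Nat × (String × String))
  | [], _ => []
  | p :: t, k =>
    match rankOf merges p with
    | none => candsA merges t (k + 1)
    | some r => (r, k, p) :: candsA merges t (k + 1)

def candsB (merges : List (String × String × Int)) (P : List (String × String)) :
    List (Int × Nat × (String × String)) :=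
  match merges with
  | [] => []
  | e :: t =>
    match firstOcc (e.1, e.2.1) P with
    | none => candsB t P
    | some i => (e.2.2, i, (e.1, e.2.1)) :: candsB t P
where
  firstOcc (p : String × String) : List (String × String) → Option Nat
    | [] => none
    | q :: t => if q = p then some 0 else (firstOcc p t).map (· + 1)

lemma mem_candsA (merges : List (String × String × Int)) (P : List (String × String))
    (k : Nat) (r : Int) (i : Nat) (p : String × String) :
    (r, i, p) ∈ candsA merges P k ↔
      ∃ j, P[j]? = some p ∧ rankOf merges p = some r ∧ i = k + j := by
  induction P generalizing k with
  | nil => simp [candsA]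
  | cons q t ih =>
    cases hq : rankOf merges q with
    | none =>
      simp only [candsA, hq, ih]
      constructor
      · rintro ⟨j, h1, h2, h3⟩
        exact ⟨j + 1, by simpa using h1, h2, by omega⟩
      · rintro ⟨j, h1, h2, h3⟩
        cases j with
        | zero =>
          have hqp : q = p := by simpa using h1
          subst hqp
          rw [hq] at h2; cases h2
        | succ j' => exact ⟨j', by simpa using h1, h2, by omega⟩
    | some rq =>
      simp only [candsA, hq, List.mem_cons, ih]
      constructor
      · rintro (heq | ⟨j, h1, h2, h3⟩)
        · have e1 : r = rq := congrArg Prod.fst heq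
          have e2 : i = k := congrArg (fun x => x.2.1) heq
          have e3 : p = q := congrArg (fun x => x.2.2) heq
          refine ⟨0, by simp [e3], ?_, by omega⟩
          rw [e3, hq, e1]
        · exact ⟨j + 1, by simpa using h1, h2, by omega⟩
      · rintro ⟨j, h1, h2, h3⟩
        cases j with
        | zero =>
          have hqp : q = p := by simpa using h1
          subst hqp
          rw [hq] at h2
          injection h2 with h2
          left
          rw [Prod.mk.injEq, Prod.mk.injEq]
          exact ⟨h2.symm, by omega, rfl⟩
        | succ j' => exact Or.inr ⟨j', by simpa using h1, h2, by omega⟩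

lemma mem_candsB (merges : List (String × String × Int)) (P : List (String × String))
    (r : Int) (i : Nat) (p : String × String) :
    (r, i, p) ∈ candsB merges P ↔
      ∃ e ∈ merges, (e.1, e.2.1) = p ∧ e.2.2 = r ∧ candsB.firstOcc p P = some i := by
  induction merges with
  | nil => simp [candsB]
  | cons e t ih =>
    cases he : candsB.firstOcc (e.1, e.2.1) P with
    | none =>
      simp only [candsB, he, ih]
      constructor
      · rintro ⟨f, h1, h2, h3, h4⟩
        exact ⟨f, List.mem_cons_of_mem _ h1, h2, h3, h4⟩
      · rintro ⟨f, h1, h2, h3, h4⟩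
        rcases List.mem_cons.mp h1 with rfl | h1'
        · rw [h2] at he; rw [he] at h4; cases h4
        · exact ⟨f, h1', h2, h3, h4⟩
    | some i0 =>
      simp only [candsB, he, List.mem_cons, ih]
      constructor
      · rintro (heq | ⟨f, h1, h2, h3, h4⟩)
        · injection heq with e1 e2
          injection e2 with e2 e3
          subst e1; subst e2; subst e3
          exact ⟨e, Or.inl rfl, rfl, rfl, he⟩
        · exact ⟨f, Or.inr h1, h2, h3, h4⟩
      · rintro ⟨f, h1, h2, h3, h4⟩
        rcases h1 with rfl | h1'
        · rw [h2] at he; rw [he] at h4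
          injection h4 with h4
          left
          rw [← h2, ← h3, h4]
        · exact Or.inr ⟨f, h1', h2, h3, h4⟩

-- ---- firstOcc / firstPos facts ----

lemma firstOcc_getElem (p : String × String) (P : List (String × String)) (i : Nat)
    (h : candsB.firstOcc p P = some i) : P[i]? = some p := by
  induction P generalizing i with
  | nil => cases h
  | cons q t ih =>
    by_cases hq : q = p
    · simp [candsB.firstOcc, hq] at h
      subst h
      simp [hq]
    · simp only [candsB.firstOcc, if_neg hq] at h
      cases ht : candsB.firstOcc p t with
      | none => rw [ht] at h; cases h
      | some i' =>
        rw [ht] at h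
        simp at h
        subst h
        simpa using ih i' ht

lemma firstOcc_of_getElem (p : String × String) (P : List (String × String)) (j : Nat)
    (h : P[j]? = some p) : ∃ i ≤ j, candsB.firstOcc p P = some i := by
  induction P generalizing j with
  | nil => simp at h
  | cons q t ih =>
    by_cases hq : q = p
    · exact ⟨0, Nat.zero_le _, by simp [candsB.firstOcc, hq]⟩
    · cases j with
      | zero => simp at h; exact absurd h hq
      | succ j' =>
        obtain ⟨i, hle, hfo⟩ := ih j' (by simpa using h)
        exact ⟨i + 1, by omega, by simp [candsB.firstOcc, hq, hfo]⟩

lemma buildFirst_get? (p : String × String) :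
    ∀ (P : List (String × String)) (k : Nat) (d : PySem.Dict (String × String) Nat),
      (buildFirst P k d).get? p =
        match d.get? p with
        | some v => some v
        | none => (candsB.firstOcc p P).map (· + k) := by
  intro P
  induction P with
  | nil => intro k d; cases hd : d.get? p <;> simp [buildFirst, hd, candsB.firstOcc]
  | cons q t ih =>
    intro k d
    rw [buildFirst, ih (k + 1) (d.setdefault q k)]
    by_cases hpq : p = q
    · subst hpq
      rw [PySem.Dict.get?_setdefault_self]
      cases hd : d.get? p with
      | some v => simp [candsB.firstOcc, hd]
      | none => simp [candsB.firstOcc, hd]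
    · rw [PySem.Dict.get?_setdefault_of_ne _ _ hpq]
      cases hd : d.get? p with
      | some v => rfl
      | none =>
        simp only [candsB.firstOcc, if_neg (fun h : q = p => hpq h.symm)]
        cases candsB.firstOcc p t with
        | none => rfl
        | some i => simp only [Option.map_some]; congr 1; omega

lemma buildFirst_firstOcc (p : String × String) (P : List (String × String)) :
    (buildFirst P 0 PySem.Dict.empty).get? p = candsB.firstOcc p P := by
  rw [buildFirst_get? p P 0 PySem.Dict.empty, PySem.Dict.get?_empty]
  cases candsB.firstOcc p P with
  | none => rfl
  | some i => simp

-- ---- rankOf facts ----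

lemma rankOf_mem (merges : List (String × String × Int)) (p : String × String) (r : Int)
    (h : rankOf merges p = some r) : ∃ e ∈ merges, (e.1, e.2.1) = p ∧ e.2.2 = r := by
  induction merges with
  | nil => cases h
  | cons e t ih =>
    obtain ⟨a, b, v⟩ := e
    by_cases hc : (a, b) = p
    · simp [rankOf, hc] at h
      exact ⟨(a, b, v), List.mem_cons_self, hc, h⟩
    · simp only [rankOf, if_neg hc] at h
      obtain ⟨f, h1, h2, h3⟩ := ih h
      exact ⟨f, List.mem_cons_of_mem _ h1, h2, h3⟩

lemma rankOf_isSome_of_mem (merges : List (String × String × Int))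
    (e : String × String × Int) (h : e ∈ merges) :
    ∃ r, rankOf merges (e.1, e.2.1) = some r := by
  induction merges with
  | nil => cases h
  | cons f t ih =>
    obtain ⟨a, b, v⟩ := f
    by_cases hc : (a, b) = (e.1, e.2.1)
    · exact ⟨v, by simp [rankOf, hc]⟩
    · rcases List.mem_cons.mp h with rfl | h'
      · exact absurd rfl hc
      · obtain ⟨r, hr⟩ := ih h'
        exact ⟨r, by simp [rankOf, hc, hr]⟩

lemma rankOf_nodup (merges : List (String × String × Int))
    (hnd : (merges.map (fun e => (e.1, e.2.1))).Nodup)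
    (e : String × String × Int) (h : e ∈ merges) :
    rankOf merges (e.1, e.2.1) = some e.2.2 := by
  induction merges with
  | nil => cases h
  | cons f t ih =>
    obtain ⟨hf, ht⟩ := List.nodup_cons.mp hnd
    rcases List.mem_cons.mp h with rfl | h'
    · simp [rankOf]
    · have hne : ¬ (f.1, f.2.1) = (e.1, e.2.1) := by
        intro hc
        apply hf
        simp only [List.mem_map]
        exact ⟨e, h', hc.symm⟩
      simp only [rankOf, if_neg hne]
      exact ih ht h'

-- ---- bridging each port's round scan to the lmin fold over its candidate list ----

def projAB : Option (Int × Nat × (String × String)) → Option ((String × String) × Int) :=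
  Option.map (fun m => (m.2.2, m.1))

lemma aFold_eq_lmin (merges : List (String × String × Int)) (P : List (String × String)) :
    ∀ (k : Nat) (acc : Option ((String × String) × Int))
      (accE : Option (Int × Nat × (String × String))),
      projAB accE = acc → (∀ m, accE = some m → m.2.1 < k) →
      P.foldl (pvScanStep merges) acc = projAB ((candsA merges P k).foldl lmin accE) := by
  induction P with
  | nil => intro k acc accE h _; simpa [candsA] using h.symm
  | cons p t ih =>
    intro k acc accE hproj hidx
    cases hr : rankOf merges p with
    | none =>
      simp only [List.foldl_cons, pvScanStep, hr, candsA]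
      exact ih (k + 1) acc accE hproj (fun m hm => Nat.lt_succ_of_lt (hidx m hm))
    | some r =>
      simp only [List.foldl_cons, pvScanStep, hr, candsA, List.foldl_cons]
      cases accE with
      | none =>
        subst hproj
        have e1 : pvG (projAB none) (p, r) = some (p, r) := rfl
        have e2 : lmin none (r, k, p) = some (r, k, p) := rfl
        rw [e1, e2]
        exact ih (k + 1) (some (p, r)) (some (r, k, p)) rfl
          (fun m' hm' => by injection hm' with h; subst h; exact Nat.lt_succ_self k)
      | some m =>
        subst hproj
        have him : m.2.1 < k := hidx m rfl
        by_cases hlt : r < m.1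
        · have e1 : pvG (projAB (some m)) (p, r) = some (p, r) := by
            simp [pvG, projAB, hlt]
          have e2 : lmin (some m) (r, k, p) = some (r, k, p) := by
            have hk : klt ((r, k, p).1, (r, k, p).2.1) ((m.1, m.2.1).1, (m.1, m.2.1).2) = true := by
              rw [klt_iff]; exact Or.inl hlt
            simp only [lmin]
            rw [if_pos (by rw [klt_iff]; exact Or.inl hlt)]
          rw [e1, e2]
          exact ih (k + 1) (some (p, r)) (some (r, k, p)) rfl
            (fun m' hm' => by injection hm' with h; subst h; exact Nat.lt_succ_self k)
        · have e1 : pvG (projAB (some m)) (p, r) = some (m.2.2, m.1) := by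
            simp [pvG, projAB, hlt]
          have e2 : lmin (some m) (r, k, p) = some m := by
            simp only [lmin]
            rw [if_neg ?_]
            rw [klt_iff]
            rintro (h | ⟨_, h⟩)
            · exact hlt h
            · simp at h; omega
          rw [e1, e2]
          exact ih (k + 1) (some (m.2.2, m.1)) (some m) rfl
            (fun m' hm' => by injection hm' with h; subst h; omega)

lemma bScan_eq_lmin (merges : List (String × String × Int)) (s : List String) :
    bScan merges s = (candsB merges (s.zip s.tail)).foldl lmin none := by
  unfold bScan
  generalize (none : Option (Int × Nat × (String × String))) = acc
  induction merges generalizing acc with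
  | nil => simp [candsB]
  | cons e t ih =>
    have he2 : candsB.firstOcc (e.1, e.2.1) (s.zip s.tail)
        = (buildFirst (s.zip s.tail) 0 PySem.Dict.empty).get? (e.1, e.2.1) :=
      (buildFirst_firstOcc (e.1, e.2.1) (s.zip s.tail)).symm
    cases he : (buildFirst (s.zip s.tail) 0 PySem.Dict.empty).get? (e.1, e.2.1) with
    | none =>
      simp only [List.foldl_cons, candsB, he2, he]
      exact ih acc
    | some i =>
      simp only [List.foldl_cons, candsB, he2, he]
      exact ih (lmin acc (e.2.2, i, (e.1, e.2.1)))

-- ---- the two rounds pick the same pair ----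

lemma roundEq (merges : List (String × String × Int))
    (hnd : (merges.map (fun e => (e.1, e.2.1))).Nodup) (s : List String) :
    ((s.zip s.tail).foldl (pvScanStep merges) none).map Prod.fst
      = (bScan merges s).map (fun m => m.2.2) := by
  set P := s.zip s.tail with hP
  have hA : P.foldl (pvScanStep merges) none = projAB ((candsA merges P 0).foldl lmin none) :=
    aFold_eq_lmin merges P 0 none none rfl (by rintro m ⟨⟩)
  rw [hA, bScan_eq_lmin]
  cases hra : (candsA merges P 0).foldl lmin none with
  | none =>
    have hCA := foldl_lmin_none_none _ hra
    cases hrb : (candsB merges P).foldl lmin none with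
    | none => simp [projAB]
    | some mB =>
      obtain ⟨hmem, _⟩ := foldl_lmin_none_spec _ _ hrb
      obtain ⟨e, he, hkey, hrank, hfo⟩ :=
        (mem_candsB merges P mB.1 mB.2.1 mB.2.2).mp (by simpa using hmem)
      have hget := firstOcc_getElem _ _ _ hfo
      obtain ⟨r'', hr''⟩ := rankOf_isSome_of_mem merges e he
      rw [hkey] at hr''
      have : (r'', mB.2.1, mB.2.2) ∈ candsA merges P 0 :=
        (mem_candsA merges P 0 r'' mB.2.1 mB.2.2).mpr ⟨mB.2.1, hget, hr'', by omega⟩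
      rw [hCA] at this
      cases this
  | some mA =>
    obtain ⟨hmemA, hminA⟩ := foldl_lmin_none_spec _ _ hra
    obtain ⟨j, hgetA, hrankA, hiA⟩ :=
      (mem_candsA merges P 0 mA.1 mA.2.1 mA.2.2).mp (by simpa using hmemA)
    have hj : j = mA.2.1 := by omega
    subst hj
    cases hrb : (candsB merges P).foldl lmin none with
    | none =>
      have hCB := foldl_lmin_none_none _ hrb
      obtain ⟨e, he, hkey, hrank⟩ := rankOf_mem merges mA.2.2 mA.1 hrankA
      obtain ⟨i', hile, hfo⟩ := firstOcc_of_getElem mA.2.2 P mA.2.1 hgetA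
      have : (mA.1, i', mA.2.2) ∈ candsB merges P :=
        (mem_candsB merges P mA.1 i' mA.2.2).mpr ⟨e, he, hkey, hrank, hfo⟩
      rw [hCB] at this
      cases this
    | some mB =>
      obtain ⟨hmemB, hminB⟩ := foldl_lmin_none_spec _ _ hrb
      obtain ⟨e, he, hkey, hrank, hfo⟩ :=
        (mem_candsB merges P mB.1 mB.2.1 mB.2.2).mp (by simpa using hmemB)
      -- mB is also an A-candidate
      have hgetB := firstOcc_getElem _ _ _ hfo
      have hrankB : rankOf merges mB.2.2 = some mB.1 := by
        have := rankOf_nodup merges hnd e he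
        rw [hkey, hrank] at this
        exact this
      have hBinA : (mB.1, mB.2.1, mB.2.2) ∈ candsA merges P 0 :=
        (mem_candsA merges P 0 mB.1 mB.2.1 mB.2.2).mpr ⟨mB.2.1, hgetB, hrankB, by omega⟩
      have h1 : kle (kOf mA) (kOf mB) := by
        have := hminA _ hBinA
        simpa [kOf] using this
      -- an A-candidate with mA's rank and an earlier position is a B-candidate
      obtain ⟨e', he', hkey', hrank'⟩ := rankOf_mem merges mA.2.2 mA.1 hrankA
      obtain ⟨i', hile, hfo'⟩ := firstOcc_of_getElem mA.2.2 P mA.2.1 hgetA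
      have hAinB : (mA.1, i', mA.2.2) ∈ candsB merges P :=
        (mem_candsB merges P mA.1 i' mA.2.2).mpr ⟨e', he', hkey', hrank', hfo'⟩
      have h2 : kle (kOf mB) (kOf mA) := by
        have hb := hminB _ hAinB
        have : kle ((mA.1, i', mA.2.2).1, (mA.1, i', mA.2.2).2.1) (kOf mA) := by
          simp only [kOf]
          right
          exact ⟨rfl, hile⟩
        exact kle_trans (by simpa [kOf] using hb) this
      have hk : kOf mA = kOf mB := kle_antisymm h1 h2
      have hpos : mA.2.1 = mB.2.1 := by
        have := congrArg Prod.snd hk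
        simpa [kOf] using this
      have : some mA.2.2 = some mB.2.2 := by
        rw [← hgetA, ← hgetB, hpos]
      simp [projAB, Option.some.inj this]

-- ---- the one-pass merge equals A's index merge ----

lemma mergeEq_aux (pair : String × String) (s : List String) :
    ∀ acc : List String,
      bMergeFin (s.foldl (bMergeStep pair.1 pair.2) (acc, none)) = acc ++ aMergePair pair s := by
  induction s using aMergePair.induct (pair := pair) with
  | case1 => intro acc; simp [bMergeFin, aMergePair]
  | case2 x => intro acc; simp [bMergeFin, bMergeStep, aMergePair]
  | case3 x y rest h ih =>
    intro acc
    obtain ⟨rfl, rfl⟩ : x = pair.1 ∧ y = pair.2 := by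
      cases pair; cases h; exact ⟨rfl, rfl⟩
    simp only [List.foldl_cons, bMergeStep, aMergePair, and_self, if_true]
    rw [ih (acc ++ [pair.1 ++ pair.2])]
    simp
  | case4 x y rest h ih =>
    intro acc
    have h' : ¬(x = pair.1 ∧ y = pair.2) := by
      rintro ⟨rfl, rfl⟩
      exact h (by cases pair; rfl)
    simp only [List.foldl_cons, bMergeStep, aMergePair]
    rw [if_neg h', if_neg h]
    have := ih (acc ++ [x])
    simp only [List.foldl_cons, bMergeStep] at this
    rw [this]
    simp

lemma mergeEq (pair : String × String) (s : List String) :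
    aMergePair pair s = bMerge pair.1 pair.2 s := by
  have := mergeEq_aux pair s []
  simp only [bMerge] at *
  simpa using this.symm

-- ---- loop equality ----

lemma bLoop_short (merges : List (String × String × Int)) (fuel : Nat) (s : List String)
    (h : s.length ≤ 1) : bLoop merges fuel s = s := by
  cases fuel with
  | zero => rfl
  | succ n => simp [bLoop, h]

lemma zip_tail_nil_of_short (s : List String) (h : s.length ≤ 1) : s.zip s.tail = [] := by
  match s with
  | [] => rfl
  | [x] => rfl
  | x :: y :: t => simp at h

lemma loopEq (merges : List (String × String × Int))
    (hnd : (merges.map (fun e => (e.1, e.2.1))).Nodup) (fuel : Nat) (s : List String) :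
    aLoop merges fuel s = bLoop merges fuel s := by
  induction fuel generalizing s with
  | zero => rfl
  | succ n ih =>
    have hmin : PySem.List.min? (aCand merges (s.zip s.tail)).items (fun kv => kv.2)
        = (s.zip s.tail).foldl (pvScanStep merges) none := by
      rw [min?_eq_pvG]
      unfold aCand
      exact pvA1 merges (s.zip s.tail) PySem.Dict.empty
        (by intro kv hkv; cases hkv) List.nodup_nil
    by_cases hlen : s.length ≤ 1
    · have hz := zip_tail_nil_of_short s hlen
      have hm0 : PySem.List.min? (aCand merges (s.zip s.tail)).items (fun kv => kv.2) = none := by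
        rw [hz]; rfl
      simp only [aLoop, bLoop, hm0]
      rw [if_pos hlen]
    · simp only [aLoop, bLoop, hmin]
      rw [if_neg hlen]
      have hround := roundEq merges hnd s
      cases hb : bScan merges s with
      | none =>
        rw [hb] at hround
        simp only [Option.map_none, Option.map_eq_none_iff] at hround
        rw [hround]
      | some best =>
        rw [hb] at hround
        cases ha : (s.zip s.tail).foldl (pvScanStep merges) none with
        | none => rw [ha] at hround; cases hround
        | some bestA =>
          rw [ha] at hround
          have hpair : bestA.1 = best.2.2 := by simpa using hround
          dsimp only
          rw [mergeEq bestA.1 s, hpair]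
          by_cases h1 : (bMerge best.2.2.1 best.2.2.2 s).length = 1
          · rw [if_pos h1]
            exact (bLoop_short merges n _ (by omega)).symm
          · rw [if_neg h1]
            exact ih _

-- ===== VERDICT (by name: the statement is the Claim_ definition above) =====
theorem bpe_encode_word_spec : Claim_equal_bpe_encode_word := by
  intro word merges _ hnd
  unfold Spec_bpe_encode_word bpe_encode_word bpe_encode_word_alt
  by_cases hw : word.toList = []
  · have hsym : wordToSymbols word = ["</w>"] := by simp [wordToSymbols, hw]
    simp only [hw, if_pos, hsym]
    rw [bLoop_short merges _ _ (by simp)]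
    decide
  · have hlen : (wordToSymbols word).length = word.toList.length + 1 := by
      simp [wordToSymbols]
    have hne1 : ¬ (wordToSymbols word).length = 1 := by
      rw [hlen]
      have : word.toList.length ≠ 0 := fun h => hw (List.length_eq_zero_iff.mp h)
      omega
    simp only [hw, hne1, ite_false, loopEq merges hnd]
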